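-- pv_equiv track=rewrite | github.com/Jasonhuajun/Math-480 | 6_18_2024_catalan/catalan.py | is_231_avoiding
-- ===== SOURCE A (Python) =====
-- def is_231_avoiding(perm):
--     n = len(perm)
--     for i in range(n):
--         for j in range(i + 1, n):
--             for k in range(j + 1, n):
--                 if perm[j] > perm[i] > perm[k]:
--                     return False
--     return True
-- ===== SOURCE B (Python) =====
-- def is_231_avoiding(perm):
--     # Linear scan: 'stack' holds a non-increasing (bottom-to-top) run of values; 'third'
--     # is the largest value popped so far, i.e. the largest value known to have a strictly
--     # greater element after it.  Any later element below 'third' completes a 231 pattern.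
--     stack = []
--     third = None
--     for x in perm:
--         if third is not None and x < third:
--             return False
--         while stack and stack[-1] < x:
--             third = stack.pop()
--         stack.append(x)
--     return True
-- ===== Notes on version B (the rewrite author's own statement) =====
-- stated objective: faster
-- what changed: Replaced the triple nested index scan with a single left-to-right pass maintaining a monotonic stack and the maximum popped value ('third'); an element below 'third' witnesses a 231 pattern.
import Mathlib
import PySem

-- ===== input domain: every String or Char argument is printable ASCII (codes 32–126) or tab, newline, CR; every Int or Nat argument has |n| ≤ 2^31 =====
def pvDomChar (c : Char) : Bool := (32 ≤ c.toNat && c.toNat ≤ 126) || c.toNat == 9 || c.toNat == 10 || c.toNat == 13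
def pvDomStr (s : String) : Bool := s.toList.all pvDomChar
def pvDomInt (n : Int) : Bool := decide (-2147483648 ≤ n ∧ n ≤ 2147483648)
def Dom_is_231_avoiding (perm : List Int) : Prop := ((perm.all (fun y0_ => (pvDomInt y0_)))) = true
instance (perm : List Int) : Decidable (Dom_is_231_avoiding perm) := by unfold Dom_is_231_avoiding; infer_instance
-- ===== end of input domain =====

-- B replaces A's triple nested index scan by one monotonic-stack pass (asymptotically faster); return values proved equal on all inputs.

-- ===== PORT A =====
-- triple nested loop over index ranges with early return False = .all of the negated condition
def is_231_avoiding (perm : List Int) : Bool :=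
  let n : Int := perm.length
  (PySem.List.pyRange 0 n 1).all fun i =>
    (PySem.List.pyRange (i + 1) n 1).all fun j =>
      (PySem.List.pyRange (j + 1) n 1).all fun k =>
        !(decide (PySem.List.pyGetD perm i 0 < PySem.List.pyGetD perm j 0 ∧
                  PySem.List.pyGetD perm k 0 < PySem.List.pyGetD perm i 0))

-- ===== PORT B =====
-- the inner 'while stack and stack[-1] < x' loop (stack head = Python's stack[-1])
def pvPop (x : Int) : List Int → Option Int → List Int × Option Int
  | [], third => ([], third)
  | s :: ss, third => if s < x then pvPop x ss (some s) else (s :: ss, third)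

-- the 'for x in perm' loop with early return False
def pvScan : List Int → List Int → Option Int → Bool
  | [], _, _ => true
  | x :: rest, stack, third =>
    if (match third with | some t => decide (x < t) | none => false) then false
    else
      let r := pvPop x stack third
      pvScan rest (x :: r.1) r.2

def is_231_avoiding_alt (perm : List Int) : Bool := pvScan perm [] none

-- ===== PRECONDITION & SPEC =====
def Spec_is_231_avoiding (perm : List Int) (out : Bool) : Prop := out = is_231_avoiding_alt perm
instance (perm : List Int) (out : Bool) : Decidable (Spec_is_231_avoiding perm out) := by unfold Spec_is_231_avoiding; infer_instance

-- ===== CLAIM (what is proved, stated in full; the proofs are below) =====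
def Claim_equal_is_231_avoiding : Prop := ∀ (perm : List Int), Dom_is_231_avoiding perm → Spec_is_231_avoiding perm (is_231_avoiding perm)

-- ===== LEMMAS AND PROOFS =====

-- "v occurs strictly before w in l" (by position)
def OPair (l : List Int) (v w : Int) : Prop :=
  ∃ i j : Nat, i < j ∧ j < l.length ∧ l.getD i 0 = v ∧ l.getD j 0 = w

-- the list has a 231 pattern
def Has231 (p : List Int) : Prop :=
  ∃ k : Nat, k < p.length ∧ ∃ v w, p.getD k 0 < v ∧ v < w ∧ OPair (p.take k) v w

-- y is below some value that is "known dominated" given the scan state (stack, third) and the future prefix pre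
def Thr (stack : List Int) (third : Option Int) (pre : List Int) (y : Int) : Prop :=
  (∃ t, third = some t ∧ y < t) ∨
  (∃ v ∈ stack, y < v ∧ ∃ w ∈ pre, v < w) ∨
  (∃ v w, y < v ∧ v < w ∧ OPair pre v w)

lemma opair_nil (v w : Int) : ¬ OPair [] v w := by
  rintro ⟨i, j, hij, hj, -⟩; simp at hj

lemma opair_cons {x v w : Int} {l : List Int} :
    OPair (x :: l) v w ↔ (v = x ∧ w ∈ l) ∨ OPair l v w := by
  constructor
  · rintro ⟨i, j, hij, hj, hv, hw⟩
    cases i with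
    | zero =>
      left
      refine ⟨by simpa using hv.symm, ?_⟩
      obtain ⟨j', rfl⟩ : ∃ j', j = j' + 1 := ⟨j - 1, by omega⟩
      have hj' : j' < l.length := by simpa using hj
      have : l.getD j' 0 = w := by simpa using hw
      rw [← this, List.getD_eq_getElem _ _ hj']
      exact List.getElem_mem _
    | succ i' =>
      right
      obtain ⟨j', rfl⟩ : ∃ j', j = j' + 1 := ⟨j - 1, by omega⟩
      exact ⟨i', j', by omega, by simpa using hj, by simpa using hv, by simpa using hw⟩
  · rintro (⟨rfl, hw⟩ | ⟨i, j, hij, hj, hv, hw⟩)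
    · obtain ⟨j, hj, rfl⟩ := List.mem_iff_getElem.1 hw
      exact ⟨0, j + 1, by omega, by simpa using hj, rfl,
        by simp [List.getD, List.getElem?_eq_getElem hj]⟩
    · exact ⟨i + 1, j + 1, by omega, by simpa using hj, by simpa using hv, by simpa using hw⟩

-- Thr over the empty prefix is exactly the 'third' test
lemma thr_nil (stack : List Int) (third : Option Int) (y : Int) :
    Thr stack third [] y ↔ ∃ t, third = some t ∧ y < t := by
  simp [Thr, opair_nil]

-- popping one element s < x replaces it by third := s without changing Thr over a prefix led by x
lemma thr_pop_step {s x : Int} {ss : List Int} {third : Option Int}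
    (hlt : s < x) (hts : ∀ t ∈ third, t ≤ s) (pre : List Int) (y : Int) :
    Thr ss (some s) (x :: pre) y ↔ Thr (s :: ss) third (x :: pre) y := by
  constructor
  · rintro (⟨t, ht, hy⟩ | ⟨v, hv, hy, w, hw, hvw⟩ | h3)
    · exact Or.inr (Or.inl ⟨s, List.mem_cons_self, by rw [Option.some.inj ht]; exact hy,
        x, List.mem_cons_self, hlt⟩)
    · exact Or.inr (Or.inl ⟨v, List.mem_cons_of_mem _ hv, hy, w, hw, hvw⟩)
    · exact Or.inr (Or.inr h3)
  · rintro (⟨t, ht, hy⟩ | ⟨v, hv, hy, w, hw, hvw⟩ | h3)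
    · exact Or.inl ⟨s, rfl, lt_of_lt_of_le hy (hts t ht)⟩
    · rcases List.mem_cons.1 hv with rfl | hv
      · exact Or.inl ⟨v, rfl, hy⟩
      · exact Or.inr (Or.inl ⟨v, hv, hy, w, hw, hvw⟩)
    · exact Or.inr (Or.inr h3)

-- specification of the pop loop: invariants are preserved and Thr transfers
lemma pvPop_spec (x : Int) (stack : List Int) (third : Option Int)
    (hs : List.Pairwise (· ≤ ·) stack)
    (ht : ∀ t ∈ third, ∀ s ∈ stack, t ≤ s)
    (hx : ∀ t ∈ third, t ≤ x) :
    List.Pairwise (· ≤ ·) (x :: (pvPop x stack third).1) ∧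
    (∀ t ∈ (pvPop x stack third).2, ∀ s ∈ x :: (pvPop x stack third).1, t ≤ s) ∧
    (∀ pre y, Thr (x :: (pvPop x stack third).1) (pvPop x stack third).2 pre y ↔
              Thr stack third (x :: pre) y) := by
  induction stack generalizing third with
  | nil =>
    refine ⟨by simp [pvPop], by simp only [pvPop]; simpa using fun t ht => hx t ht, fun pre y => ?_⟩
    simp only [pvPop, Thr, opair_cons, List.mem_singleton, List.not_mem_nil]
    constructor
    · rintro (h1 | ⟨v, rfl, hy, w, hw, hvw⟩ | ⟨v, w, hy, hvw, hp⟩)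
      · exact Or.inl h1
      · exact Or.inr (Or.inr ⟨v, w, hy, hvw, Or.inl ⟨rfl, hw⟩⟩)
      · exact Or.inr (Or.inr ⟨v, w, hy, hvw, Or.inr hp⟩)
    · rintro (h1 | ⟨v, hv, -⟩ | ⟨v, w, hy, hvw, (⟨rfl, hw⟩ | hp)⟩)
      · exact Or.inl h1
      · exact absurd hv (by simp)
      · exact Or.inr (Or.inl ⟨v, rfl, hy, w, hw, hvw⟩)
      · exact Or.inr (Or.inr ⟨v, w, hy, hvw, hp⟩)
  | cons s ss ih =>
    rcases List.pairwise_cons.1 hs with ⟨hsle, hss⟩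
    by_cases hlt : s < x
    · have hrw : pvPop x (s :: ss) third = pvPop x ss (some s) := by
        simp [pvPop, hlt]
      rw [hrw]
      obtain ⟨h1, h2, h3⟩ := ih (some s) hss (by simpa using hsle) (by simpa using hlt.le)
      exact ⟨h1, h2, fun pre y => (h3 pre y).trans (thr_pop_step hlt (fun t htt => ht t htt s List.mem_cons_self) pre y)⟩
    · have hrw : pvPop x (s :: ss) third = (s :: ss, third) := by
        simp [pvPop, hlt]
      rw [hrw]
      have hxle : x ≤ s := le_of_not_gt hlt
      have hall : ∀ u ∈ s :: ss, x ≤ u := by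
        intro u hu; rcases List.mem_cons.1 hu with rfl | hu
        · exact hxle
        · exact hxle.trans (hsle u hu)
      refine ⟨List.pairwise_cons.2 ⟨hall, hs⟩, ?_, fun pre y => ?_⟩
      · intro t htt u hu
        rcases List.mem_cons.1 hu with rfl | hu
        · exact hx t htt
        · exact ht t htt u hu
      · simp only [Thr, opair_cons, List.mem_cons]
        constructor
        · rintro (h1 | ⟨v, hv, hy, w, hw, hvw⟩ | ⟨v, w, hy, hvw, hp⟩)
          · exact Or.inl h1
          · rcases hv with rfl | hv
            · exact Or.inr (Or.inr ⟨v, w, hy, hvw, Or.inl ⟨rfl, hw⟩⟩)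
            · exact Or.inr (Or.inl ⟨v, hv, hy, w, Or.inr hw, hvw⟩)
          · exact Or.inr (Or.inr ⟨v, w, hy, hvw, Or.inr hp⟩)
        · rintro (h1 | ⟨v, hv, hy, w, hw, hvw⟩ | ⟨v, w, hy, hvw, (⟨rfl, hw⟩ | hp)⟩)
          · exact Or.inl h1
          · rcases hw with rfl | hw
            · exact absurd hvw (not_lt.2 (hall v (List.mem_cons.2 hv)))
            · exact Or.inr (Or.inl ⟨v, Or.inr hv, hy, w, hw, hvw⟩)
          · exact Or.inr (Or.inl ⟨v, Or.inl rfl, hy, w, hw, hvw⟩)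
          · exact Or.inr (Or.inr ⟨v, w, hy, hvw, hp⟩)

-- the main loop invariant
lemma pvScan_false_iff : ∀ (rest stack : List Int) (third : Option Int),
    List.Pairwise (· ≤ ·) stack →
    (∀ t ∈ third, ∀ s ∈ stack, t ≤ s) →
    (pvScan rest stack third = false ↔
      ∃ k : Nat, k < rest.length ∧ Thr stack third (rest.take k) (rest.getD k 0)) := by
  intro rest
  induction rest with
  | nil => intro stack third _ _; simp [pvScan]
  | cons x rest ih =>
    intro stack third hs ht
    by_cases hg : ∃ t, third = some t ∧ x < t
    · obtain ⟨t, rfl, hxt⟩ := hg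
      constructor
      · intro _; exact ⟨0, by simp, (thr_nil _ _ _).2 ⟨t, rfl, hxt⟩⟩
      · intro _; simp [pvScan, hxt]
    · have hrw : pvScan (x :: rest) stack third
          = pvScan rest (x :: (pvPop x stack third).1) (pvPop x stack third).2 := by
        cases third with
        | none => simp [pvScan]
        | some t =>
          have hnx : ¬ x < t := fun h => hg ⟨t, rfl, h⟩
          simp [pvScan, hnx]
      have hx : ∀ t ∈ third, t ≤ x := by
        intro t htt
        exact le_of_not_gt (fun h => hg ⟨t, htt, h⟩)
      obtain ⟨h1, h2, h3⟩ := pvPop_spec x stack third hs ht hx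
      rw [hrw, ih _ _ h1 h2]
      constructor
      · rintro ⟨k, hk, hthr⟩
        exact ⟨k + 1, by simp; omega, by simpa [List.take_succ_cons] using (h3 _ _).1 hthr⟩
      · rintro ⟨k, hk, hthr⟩
        cases k with
        | zero => exact absurd ((thr_nil _ _ _).1 (by simpa using hthr)) hg
        | succ k =>
          exact ⟨k, by simpa using hk, (h3 _ _).2 (by simpa [List.take_succ_cons] using hthr)⟩

lemma alt_false_iff (p : List Int) : is_231_avoiding_alt p = false ↔ Has231 p := by
  unfold is_231_avoiding_alt
  rw [pvScan_false_iff p [] none (by simp) (by simp)]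
  simp [Thr, Has231]

lemma getD_take_eq (l : List Int) (k i : Nat) (h : i < k) (hk : k ≤ l.length) :
    (l.take k).getD i 0 = l.getD i 0 := by
  rw [List.getD_eq_getElem _ _ (by simp; omega), List.getD_eq_getElem _ _ (by omega),
    List.getElem_take]

lemma a_true_iff (p : List Int) : is_231_avoiding p = true ↔
    (∀ i : ℤ, 0 ≤ i ∧ i < p.length → ∀ j : ℤ, i + 1 ≤ j ∧ j < p.length →
      ∀ k : ℤ, j + 1 ≤ k ∧ k < p.length →
        PySem.List.pyGetD p i 0 < PySem.List.pyGetD p j 0 →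
          PySem.List.pyGetD p i 0 ≤ PySem.List.pyGetD p k 0) := by
  unfold is_231_avoiding
  simp only [List.all_eq_true, PySem.List.mem_pyRange_one, Bool.not_eq_eq_eq_not,
    Bool.not_true, decide_eq_false_iff_not, not_and, not_lt]

lemma a_false_iff (p : List Int) : is_231_avoiding p = false ↔ Has231 p := by
  rw [← Bool.not_eq_true, a_true_iff]
  push Not
  constructor
  · rintro ⟨i, ⟨hi0, hin⟩, j, ⟨hij, hjn⟩, k, ⟨hjk, hkn⟩, h1, h2⟩
    obtain ⟨i', rfl⟩ : ∃ i' : Nat, i = (i' : Int) := ⟨i.toNat, (Int.toNat_of_nonneg hi0).symm⟩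
    obtain ⟨j', rfl⟩ : ∃ j' : Nat, j = (j' : Int) := ⟨j.toNat, (Int.toNat_of_nonneg (by omega)).symm⟩
    obtain ⟨k', rfl⟩ : ∃ k' : Nat, k = (k' : Int) := ⟨k.toNat, (Int.toNat_of_nonneg (by omega)).symm⟩
    simp only [PySem.List.pyGetD_natCast] at h1 h2
    refine ⟨k', by exact_mod_cast hkn, p.getD i' 0, p.getD j' 0, h2, h1, i', j', by omega,
      ?_, ?_, ?_⟩
    · simp; omega
    · exact getD_take_eq p k' i' (by omega) (by omega)
    · exact getD_take_eq p k' j' (by omega) (by omega)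
  · rintro ⟨k', hk, v, w, hyv, hvw, i', j', hij, hjlen, hv, hw⟩
    have hjk : j' < k' := by have := hjlen; simp at this; omega
    refine ⟨(i' : Int), ⟨by omega, by exact_mod_cast (by omega : i' < p.length)⟩,
      (j' : Int), ⟨by exact_mod_cast hij, by exact_mod_cast (by omega : j' < p.length)⟩,
      (k' : Int), ⟨by exact_mod_cast hjk, by exact_mod_cast hk⟩, ?_, ?_⟩
    · simp only [PySem.List.pyGetD_natCast]
      rw [← getD_take_eq p k' i' (by omega) (by omega),
        ← getD_take_eq p k' j' (by omega) (by omega), hv, hw]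
      exact hvw
    · simp only [PySem.List.pyGetD_natCast]
      rw [← getD_take_eq p k' i' (by omega) (by omega), hv]
      omega

-- ===== VERDICT (by name: the statement is the Claim_ definition above) =====
theorem is_231_avoiding_spec : Claim_equal_is_231_avoiding := by
  intro perm _
  unfold Spec_is_231_avoiding
  have hA := a_false_iff perm
  have hB := alt_false_iff perm
  cases h1 : is_231_avoiding perm <;> cases h2 : is_231_avoiding_alt perm <;> simp_all
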